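-- pv_equiv track=rewrite | github.com/dmehrotra/uber-ocr | ocr/parse_uber.py | try_order_r
-- ===== SOURCE A (Python) =====
-- def try_order_r(content):
-- 	line_index = None
-- 	for l in content:
-- 		if line_index == None:
-- 			if "rider pays" in l:
-- 				line_index = content.index(l)
-- 		else:
-- 			if "total" in l:
-- 				return l.split("total")[1].strip()
-- 			elif "price" in l:
-- 				return l.split("price")[1].strip()
-- ===== SOURCE B (Python) =====
-- def try_order_r(content):
--     idx = next((i for i, l in enumerate(content) if "rider pays" in l), None)
--     if idx is None:
--         return None
--     for l in content[idx + 1:]: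
--         if "total" in l:
--             return l.split("total")[1].strip()
--         if "price" in l:
--             return l.split("price")[1].strip()
--     return None
-- ===== Notes on version B (the rewrite author's own statement) =====
-- stated objective: simpler
-- what changed: Replaced the single state-flag loop (with its redundant content.index call) by a two-phase locate-then-extract decomposition: find the first 'rider pays' line index, then scan only the slice after it.
import Mathlib
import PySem

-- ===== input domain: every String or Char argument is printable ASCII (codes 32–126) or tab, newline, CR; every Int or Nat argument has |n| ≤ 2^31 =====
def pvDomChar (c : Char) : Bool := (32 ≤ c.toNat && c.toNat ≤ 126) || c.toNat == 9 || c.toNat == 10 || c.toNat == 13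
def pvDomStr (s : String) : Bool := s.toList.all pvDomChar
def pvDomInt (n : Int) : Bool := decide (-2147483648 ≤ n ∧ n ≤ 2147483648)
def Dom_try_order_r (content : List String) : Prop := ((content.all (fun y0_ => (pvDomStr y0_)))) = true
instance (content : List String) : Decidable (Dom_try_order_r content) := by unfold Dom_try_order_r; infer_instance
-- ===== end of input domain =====

-- B replaces A's single state-flag scan by a locate-then-extract two-phase decomposition (objective: simpler); same cost.


-- ===== PORT A =====
-- extracts l.split(sep)[1].strip(); used only after 'sep in l' guarantees index 1 exists
def pvSplit1Strip (l sep : String) : String :=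
  PySem.Str.strip ((PySem.List.pyGet? ((PySem.Str.split? l sep).getD []) 1).getD "")

-- A's for-loop with state line_index : Option Nat (Python's line_index, None = flag unset)
def tryOrderRLoop (content : List String) : List String → Option Nat → Option String
  | [], _ => none
  | l :: ls, li =>
    if li = none then
      (if PySem.Str.isIn "rider pays" l then
        tryOrderRLoop content ls (PySem.List.index? content l)
      else tryOrderRLoop content ls li)
    else
      if PySem.Str.isIn "total" l then some (pvSplit1Strip l "total")
      else if PySem.Str.isIn "price" l then some (pvSplit1Strip l "price")
      else tryOrderRLoop content ls li

def try_order_r (content : List String) : Option String :=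
  tryOrderRLoop content content none

-- ===== PORT B =====
-- B's phase 2: scan the lines after the marker for 'total' / 'price'
def pvExtractTP : List String → Option String
  | [] => none
  | l :: ls =>
    if PySem.Str.isIn "total" l then some (pvSplit1Strip l "total")
    else if PySem.Str.isIn "price" l then some (pvSplit1Strip l "price")
    else pvExtractTP ls

def try_order_r_alt (content : List String) : Option String :=
  match content.findIdx? (fun l => PySem.Str.isIn "rider pays" l) with
  | none => none
  | some i => pvExtractTP (content.drop (i + 1))

-- ===== PRECONDITION & SPEC =====
def Spec_try_order_r (content : List String) (out : Option String) : Prop := out = try_order_r_alt content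
instance (content : List String) (out : Option String) : Decidable (Spec_try_order_r content out) := by unfold Spec_try_order_r; infer_instance

-- ===== CLAIM (what is proved, stated in full; the proofs are below) =====
def Claim_equal_try_order_r : Prop := ∀ (content : List String), Dom_try_order_r content → Spec_try_order_r content (try_order_r content)

-- ===== LEMMAS AND PROOFS =====
-- once the flag is set, its value is irrelevant: the loop is exactly B's extraction scan
theorem tryOrderRLoop_some (content : List String) (k : Nat) :
    ∀ ls, tryOrderRLoop content ls (some k) = pvExtractTP ls := by
  intro ls
  induction ls with
  | nil => rfl
  | cons l t ih =>
    unfold tryOrderRLoop pvExtractTP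
    rw [if_neg (by simp)]
    rw [ih]

theorem tryOrderRLoop_none (content : List String) :
    ∀ ls, (∀ l ∈ ls, l ∈ content) →
      tryOrderRLoop content ls none =
        match ls.findIdx? (fun l => PySem.Str.isIn "rider pays" l) with
        | none => none
        | some i => pvExtractTP (ls.drop (i + 1)) := by
  intro ls
  induction ls with
  | nil => intro _; rfl
  | cons l t ih =>
    intro h
    by_cases hp : PySem.Str.isIn "rider pays" l = true
    · have hmem : l ∈ content := h l (List.mem_cons_self ..)
      obtain ⟨k, hk⟩ : ∃ k, PySem.List.index? content l = some k := by
        rw [PySem.List.index?_eq_idxOf?]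
        exact Option.isSome_iff_exists.mp (List.isSome_idxOf?.mpr hmem)
      unfold tryOrderRLoop
      rw [if_pos rfl, if_pos hp, hk, tryOrderRLoop_some, List.findIdx?_cons]
      simp only [hp, reduceIte, List.drop_succ_cons, List.drop_zero]
    · have ih' := ih (fun x hx => h x (List.mem_cons_of_mem _ hx))
      unfold tryOrderRLoop
      rw [if_pos rfl, if_neg hp, ih', List.findIdx?_cons]
      simp only [hp, Bool.false_eq_true, if_false]
      cases t.findIdx? (fun l => PySem.Str.isIn "rider pays" l) with
      | none => rfl
      | some i => simp [List.drop_succ_cons]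

-- ===== VERDICT (by name: the statement is the Claim_ definition above) =====
theorem try_order_r_spec : Claim_equal_try_order_r := by
  intro content _
  unfold Spec_try_order_r try_order_r try_order_r_alt
  exact tryOrderRLoop_none content content (fun _ h => h)
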